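-- pv_equiv track=rewrite | github.com/0x486F626F/6502Com | tools/qm_reducer/main.py | gen_num
-- ===== SOURCE A (Python) =====
-- def gen_num(pattern):
--     if len(pattern) == 0:
--         return [0]
--     prev = gen_num(pattern[:-1])
--     ans0 = [i*2 for i in prev]
--     ans1 = [i*2+1 for i in prev]
--     if pattern[-1] == '0':
--         return ans0
--     elif pattern[-1] == '1':
--         return ans1
--     else:
--         return ans0+ans1
-- ===== SOURCE B (Python) =====
-- def gen_num(pattern):
--     n = len(pattern)
--     base = 0
--     weights = []
--     for i, c in enumerate(pattern):
--         if c == '1':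
--             base += 1 << (n - 1 - i)
--         elif c == '0':
--             pass
--         else:
--             weights.append(1 << (n - 1 - i))
--     out = [base]
--     for w in weights:
--         out = out + [v + w for v in out]
--     return out
-- ===== Notes on version B (the rewrite author's own statement) =====
-- stated objective: faster
-- what changed: A recursively rebuilds (and for wildcards doubles) the whole result list at every character; B makes one pass collapsing all fixed bits into a single base value plus a weight per wildcard, then doubles the output list only once per wildcard by adding that weight.
import Mathlib
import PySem

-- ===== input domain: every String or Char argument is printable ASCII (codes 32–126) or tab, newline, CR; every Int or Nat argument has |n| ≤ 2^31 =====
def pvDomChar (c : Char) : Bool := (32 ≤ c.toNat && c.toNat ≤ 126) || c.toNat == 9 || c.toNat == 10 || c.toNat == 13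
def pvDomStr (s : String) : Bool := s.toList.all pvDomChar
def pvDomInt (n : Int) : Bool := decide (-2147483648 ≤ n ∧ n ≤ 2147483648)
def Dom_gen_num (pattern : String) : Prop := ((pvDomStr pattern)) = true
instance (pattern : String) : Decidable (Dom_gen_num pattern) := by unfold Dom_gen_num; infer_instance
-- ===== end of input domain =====

-- B replaces A's recursion (which doubles the whole result list at EVERY character) by one pass
-- collapsing the fixed bits into a base value and wildcard weights, then doubles the output only
-- per wildcard (objective: faster by a constant-factor mechanism; also avoids A's deep recursion).

-- ===== PORT A =====
-- literal transliteration of A: recursion on pattern[:-1] (= slice … (-1)), last char via pyGet? (-1)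
def genNumRec (cs : List Char) : List Int :=
  if _h : cs.length = 0 then [0]
  else
    let prev := genNumRec (PySem.List.slice cs none (some (-1)))
    let ans0 := prev.map (fun i => i * 2)
    let ans1 := prev.map (fun i => i * 2 + 1)
    match PySem.List.pyGet? cs (-1) with
    | some c => if c = '0' then ans0 else if c = '1' then ans1 else ans0 ++ ans1
    | none => [0]   -- unreachable: cs ≠ []
termination_by cs.length
decreasing_by
  simp only [PySem.List.slice_to_neg_one, List.length_dropLast]
  omega

def gen_num (pattern : String) : List Int := genNumRec pattern.toList

-- ===== PORT B =====
-- literal transliteration of Source B: one enumerate pass building (base, weights), then one doubling pass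
def gen_num_alt (pattern : String) : List Int :=
  let cs := pattern.toList
  let n := cs.length
  let bw := (PySem.List.enumerate cs 0).foldl
    (fun (acc : Int × List Int) (p : Int × Char) =>
      if p.2 = '1' then (acc.1 + ((1 : Int) <<< (n - 1 - p.1.toNat)), acc.2)
      else if p.2 = '0' then acc
      else (acc.1, acc.2 ++ [(1 : Int) <<< (n - 1 - p.1.toNat)]))
    ((0 : Int), ([] : List Int))
  bw.2.foldl (fun out w => out ++ out.map (fun v => v + w)) [bw.1]

-- ===== PRECONDITION & SPEC =====
def Spec_gen_num (pattern : String) (out : List Int) : Prop := out = gen_num_alt pattern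
instance (pattern : String) (out : List Int) : Decidable (Spec_gen_num pattern out) := by unfold Spec_gen_num; infer_instance

-- ===== CLAIM (what is proved, stated in full; the proofs are below) =====
def Claim_equal_gen_num : Prop := ∀ (pattern : String), Dom_gen_num pattern → Spec_gen_num pattern (gen_num pattern)

-- ===== LEMMAS AND PROOFS =====

-- reference values: the fixed bits read as a binary number, and the wildcard weights in position order
def baseOf (cs : List Char) : Int :=
  cs.foldl (fun b c => 2 * b + (if c = '1' then 1 else 0)) 0

def wtsOf (cs : List Char) : List Int :=
  cs.foldl (fun w c => w.map (fun x => 2 * x) ++ (if c = '1' ∨ c = '0' then [] else [1])) []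

-- generalized-initial-value forms
theorem baseOf_foldl (cs : List Char) (b0 : Int) :
    cs.foldl (fun b c => 2 * b + (if c = '1' then 1 else 0)) b0
      = b0 * 2 ^ cs.length + baseOf cs := by
  induction cs generalizing b0 with
  | nil => simp [baseOf]
  | cons c rest ih =>
    simp only [List.foldl_cons, baseOf]
    rw [ih, ih (2 * 0 + (if c = '1' then 1 else 0))]
    simp [pow_succ]
    split_ifs <;> ring

theorem wtsOf_foldl (cs : List Char) (w0 : List Int) :
    cs.foldl (fun w c => w.map (fun x => 2 * x) ++ (if c = '1' ∨ c = '0' then [] else [1])) w0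
      = w0.map (fun x => 2 ^ cs.length * x) ++ wtsOf cs := by
  induction cs generalizing w0 with
  | nil => simp [wtsOf]
  | cons c rest ih =>
    simp only [List.foldl_cons, wtsOf]
    rw [ih, ih (List.map (fun x => 2 * x) [] ++ (if c = '1' ∨ c = '0' then [] else [1]))]
    simp [List.map_append, List.map_map, pow_succ]

theorem baseOf_cons (c : Char) (rest : List Char) :
    baseOf (c :: rest) = (if c = '1' then (2 : Int) ^ rest.length else 0) + baseOf rest := by
  show List.foldl _ _ _ = _
  rw [List.foldl_cons, baseOf_foldl]
  split_ifs <;> ring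

theorem wtsOf_cons (c : Char) (rest : List Char) :
    wtsOf (c :: rest) = (if c = '1' ∨ c = '0' then [] else [(2 : Int) ^ rest.length]) ++ wtsOf rest := by
  show List.foldl _ _ _ = _
  rw [List.foldl_cons, wtsOf_foldl]
  split_ifs <;> simp

-- B's first loop computes (baseOf, wtsOf)
theorem enum_loop (cs : List Char) (n s : Nat) (b : Int) (ws : List Int) (h : n = s + cs.length) :
    (PySem.List.enumerate cs (s : Int)).foldl
      (fun (acc : Int × List Int) (p : Int × Char) =>
        if p.2 = '1' then (acc.1 + ((1 : Int) <<< (n - 1 - p.1.toNat)), acc.2)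
        else if p.2 = '0' then acc
        else (acc.1, acc.2 ++ [(1 : Int) <<< (n - 1 - p.1.toNat)]))
      (b, ws)
      = (b + baseOf cs, ws ++ wtsOf cs) := by
  induction cs generalizing s b ws with
  | nil => simp [PySem.List.enumerate_nil, baseOf, wtsOf]
  | cons c rest ih =>
    rw [PySem.List.enumerate_cons, List.foldl_cons]
    have hexp : n - 1 - s = rest.length := by simp only [List.length_cons] at h; omega
    have hcast : (s : Int) + 1 = ((s + 1 : Nat) : Int) := by push_cast; ring
    have hn : n = (s + 1) + rest.length := by simp only [List.length_cons] at h; omega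
    rw [hcast]
    by_cases hc1 : c = '1'
    · simp only [hc1, reduceIte, Int.toNat_natCast]
      rw [ih (s + 1) _ _ hn, baseOf_cons, wtsOf_cons]
      simp [Int.shiftLeft_eq, hexp]
      ring
    · by_cases hc0 : c = '0'
      · simp only [hc0, reduceIte]
        rw [ih (s + 1) _ _ hn, baseOf_cons, wtsOf_cons]
        simp
      · simp only [hc1, hc0, reduceIte, Int.toNat_natCast]
        rw [ih (s + 1) _ _ hn, baseOf_cons, wtsOf_cons]
        simp [Int.shiftLeft_eq, hexp, hc1, hc0]

-- the doubling fold commutes with affine maps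
theorem gfold_affine (ws : List Int) (out : List Int) (t : Int) :
    (ws.foldl (fun out w => out ++ out.map (fun v => v + w)) out).map (fun v => v * 2 + t)
      = (ws.map (fun w => 2 * w)).foldl (fun out w => out ++ out.map (fun v => v + w))
          (out.map (fun v => v * 2 + t)) := by
  induction ws generalizing out with
  | nil => rfl
  | cons w ws ih =>
    simp only [List.foldl_cons, List.map_cons]
    rw [ih]
    congr 1
    simp only [List.map_append, List.map_map]
    congr 1
    apply List.map_congr_left
    intro v _
    simp [Function.comp]
    ring

theorem gfold_shift (ws : List Int) (out : List Int) (t : Int) :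
    (ws.foldl (fun out w => out ++ out.map (fun v => v + w)) out).map (fun v => v + t)
      = ws.foldl (fun out w => out ++ out.map (fun v => v + w)) (out.map (fun v => v + t)) := by
  induction ws generalizing out with
  | nil => rfl
  | cons w ws ih =>
    simp only [List.foldl_cons]
    rw [ih]
    congr 1
    simp only [List.map_append, List.map_map]
    congr 1
    apply List.map_congr_left
    intro v _
    simp [Function.comp]
    ring

theorem baseOf_snoc (l : List Char) (c : Char) :
    baseOf (l ++ [c]) = 2 * baseOf l + (if c = '1' then 1 else 0) := by
  show List.foldl _ _ _ = _
  rw [List.foldl_append]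
  rfl

theorem wtsOf_snoc (l : List Char) (c : Char) :
    wtsOf (l ++ [c]) = (wtsOf l).map (fun x => 2 * x) ++ (if c = '1' ∨ c = '0' then [] else [1]) := by
  show List.foldl _ _ _ = _
  rw [List.foldl_append]
  rfl

-- A's recursion produces the same doubling fold
theorem genNumRec_eq (cs : List Char) :
    genNumRec cs = (wtsOf cs).foldl (fun out w => out ++ out.map (fun v => v + w)) [baseOf cs] := by
  induction cs using List.reverseRecOn with
  | nil => rw [genNumRec]; simp [baseOf, wtsOf]
  | append_singleton l c ih =>
    rw [genNumRec]
    rw [dif_neg (by simp)]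
    have hslice : PySem.List.slice (l ++ [c]) none (some (-1)) = l := by
      simp [PySem.List.slice_to_neg_one]
    have hlast : PySem.List.pyGet? (l ++ [c]) (-1) = some c := by
      simp [PySem.List.pyGet?, PySem.List.pyIdx?]
    rw [hslice, hlast, ih, baseOf_snoc, wtsOf_snoc]
    by_cases hc1 : c = '1'
    · simp only [hc1, reduceIte]
      rw [gfold_affine]
      have e1 : List.map (fun v : Int => v * 2 + 1) [baseOf l] = [2 * baseOf l + 1] := by
        simp; ring
      rw [e1]
      simp
    · by_cases hc0 : c = '0'
      · simp only [hc0, reduceIte]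
        have h0 : (fun (i : Int) => i * 2) = (fun (v : Int) => v * 2 + 0) := by funext v; ring
        rw [h0, gfold_affine]
        have e0 : List.map (fun v : Int => v * 2 + 0) [baseOf l] = [2 * baseOf l + 0] := by
          simp; ring
        rw [e0]
        norm_num
        rw [if_neg (by decide : ¬ ('0' : Char) = '1')]
        norm_num
      · simp only [hc1, hc0, reduceIte]
        rw [if_neg (by simp [hc0])]
        rw [List.foldl_append, List.foldl_cons, List.foldl_nil]
        have h0 : (fun (i : Int) => i * 2) = (fun (v : Int) => v * 2 + 0) := by funext v; ring
        rw [h0, gfold_affine, gfold_affine, gfold_shift]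
        have e2 : List.map (fun v : Int => v + 1) [2 * baseOf l + 0] = List.map (fun v : Int => v * 2 + 1) [baseOf l] := by
          simp; ring
        have e0 : List.map (fun v : Int => v * 2 + 0) [baseOf l] = [2 * baseOf l + 0] := by
          simp; ring
        rw [e2, ← e0]

-- ===== VERDICT (by name: the statement is the Claim_ definition above) =====
theorem gen_num_spec : Claim_equal_gen_num := by
  intro pattern _
  unfold Spec_gen_num gen_num gen_num_alt
  rw [genNumRec_eq]
  have h := enum_loop pattern.toList pattern.toList.length 0 0 [] (by simp)
  simp only [Nat.cast_zero, zero_add, List.nil_append] at h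
  simp only [h]
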